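-- pv_equiv track=rewrite | github.com/Yima-Gu/my-assignment1-basics | cs336_basics/tokenizer.py | merge_the_pair
-- ===== SOURCE A (Python) =====
-- def merge_the_pair(tokens, best_pair):
--     new_token_list = []
--     new_token = best_pair[0] + best_pair[1]
--     i = 0
--     while i < len(tokens):
--         # Check if the current and next tokens is the best_pair
--         if (i < len(tokens) -1 ) and ((tokens[i], tokens[i+1]) ==best_pair):
--             new_token_list.append(new_token)
--             i+=2
--         else:
--             new_token_list.append(tokens[i])
--             i+=1
--
--     return new_token_list
-- ===== SOURCE B (Python) =====
-- def merge_the_pair(tokens, best_pair):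
--     new_token = best_pair[0] + best_pair[1]
--     out = []
--     pending = None
--     for tok in tokens:
--         if pending is not None and (pending, tok) == best_pair:
--             out.append(new_token)
--             pending = None
--         elif pending is not None:
--             out.append(pending)
--             pending = tok
--         else:
--             pending = tok
--     if pending is not None:
--         out.append(pending)
--     return out
-- ===== Notes on version B (the rewrite author's own statement) =====
-- stated objective: alternative
-- what changed: Replaced the index-with-lookahead while-loop by a single streaming pass that keeps one pending token and merges it with the incoming token when it forms best_pair.
import Mathlib
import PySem

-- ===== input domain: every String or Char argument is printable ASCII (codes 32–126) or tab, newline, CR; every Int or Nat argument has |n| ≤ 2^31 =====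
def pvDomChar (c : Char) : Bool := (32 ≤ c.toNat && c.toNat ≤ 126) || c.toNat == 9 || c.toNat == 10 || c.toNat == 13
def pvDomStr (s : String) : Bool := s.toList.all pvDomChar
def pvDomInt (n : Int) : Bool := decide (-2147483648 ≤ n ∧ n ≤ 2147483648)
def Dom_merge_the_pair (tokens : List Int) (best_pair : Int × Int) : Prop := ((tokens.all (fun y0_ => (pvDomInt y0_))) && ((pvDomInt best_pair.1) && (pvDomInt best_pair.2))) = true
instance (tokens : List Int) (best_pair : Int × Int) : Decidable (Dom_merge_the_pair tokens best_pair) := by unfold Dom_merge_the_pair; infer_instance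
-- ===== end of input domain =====

-- B replaces A's index/lookahead while-loop by a single streaming pass with one pending token (alternative decomposition, same cost).

-- ===== PORT A =====
-- while-loop of A: index i over tokens, appending to the accumulator
def mergeA_loop (tokens : List Int) (best_pair : Int × Int) (new_token : Int) (i : Nat) (acc : List Int) : List Int :=
  if h : i < tokens.length then
    if i < tokens.length - 1 ∧ (tokens[i]!, tokens[(i+1)]!) = best_pair then
      mergeA_loop tokens best_pair new_token (i+2) (acc ++ [new_token])
    else
      mergeA_loop tokens best_pair new_token (i+1) (acc ++ [tokens[i]!])
  else acc
termination_by tokens.length - i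

def merge_the_pair (tokens : List Int) (best_pair : Int × Int) : List Int :=
  mergeA_loop tokens best_pair (best_pair.1 + best_pair.2) 0 []

-- ===== PORT B =====
-- one foldl step of Source B's for-loop: state = (out, pending)
def mergeB_step (best_pair : Int × Int) (new_token : Int) (s : List Int × Option Int) (tok : Int) : List Int × Option Int :=
  match s.2 with
  | some p => if (p, tok) = best_pair then (s.1 ++ [new_token], none) else (s.1 ++ [p], some tok)
  | none => (s.1, some tok)

def mergeB_finish (s : List Int × Option Int) : List Int :=
  match s.2 with
  | some p => s.1 ++ [p]
  | none => s.1

def merge_the_pair_alt (tokens : List Int) (best_pair : Int × Int) : List Int :=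
  let new_token := best_pair.1 + best_pair.2
  mergeB_finish (tokens.foldl (mergeB_step best_pair new_token) ([], none))

-- ===== PRECONDITION & SPEC =====
def Spec_merge_the_pair (tokens : List Int) (best_pair : Int × Int) (out : List Int) : Prop := out = merge_the_pair_alt tokens best_pair
instance (tokens : List Int) (best_pair : Int × Int) (out : List Int) : Decidable (Spec_merge_the_pair tokens best_pair out) := by unfold Spec_merge_the_pair; infer_instance

-- ===== CLAIM (what is proved, stated in full; the proofs are below) =====
def Claim_equal_merge_the_pair : Prop := ∀ (tokens : List Int) (best_pair : Int × Int), Dom_merge_the_pair tokens best_pair → Spec_merge_the_pair tokens best_pair (merge_the_pair tokens best_pair)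

-- ===== LEMMAS AND PROOFS =====

-- mediating specification: greedy non-overlapping merge by structural recursion
def gMerge (best_pair : Int × Int) (new_token : Int) : List Int → List Int
  | [] => []
  | [a] => [a]
  | a :: b :: rest =>
    if (a, b) = best_pair then new_token :: gMerge best_pair new_token rest
    else a :: gMerge best_pair new_token (b :: rest)

theorem mergeA_loop_eq_aux (tokens : List Int) (bp : Int × Int) (nt : Int) :
    ∀ n i acc, tokens.length - i ≤ n →
      mergeA_loop tokens bp nt i acc = acc ++ gMerge bp nt (tokens.drop i) := by
  intro n
  induction n with
  | zero =>
    intro i acc hn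
    rw [mergeA_loop]
    have h : ¬ i < tokens.length := by omega
    simp only [h, dif_neg, not_false_iff]
    rw [List.drop_eq_nil_of_le (by omega), gMerge]
    simp
  | succ n ih =>
    intro i acc hn
    rw [mergeA_loop]
    by_cases h : i < tokens.length
    · have hd : tokens.drop i = tokens[i] :: tokens.drop (i+1) :=
        List.drop_eq_getElem_cons h
      simp only [h, dif_pos]
      by_cases h2 : i < tokens.length - 1
      · have h1 : i + 1 < tokens.length := by omega
        have hd2 : tokens.drop (i+1) = tokens[i+1] :: tokens.drop (i+2) :=
          List.drop_eq_getElem_cons h1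
        simp only [getElem!_pos tokens i h, getElem!_pos tokens (i+1) h1]
        by_cases hp : (tokens[i], tokens[i+1]) = bp
        · rw [if_pos ⟨h2, hp⟩, ih (i+2) _ (by omega)]
          rw [hd, hd2, gMerge, if_pos hp]
          simp
        · rw [if_neg (by simp [hp]), ih (i+1) _ (by omega)]
          rw [hd, hd2, gMerge, if_neg hp]
          simp
      · have hlast : tokens.drop (i+1) = [] := by
          apply List.drop_eq_nil_of_le; omega
        simp only [getElem!_pos tokens i h]
        rw [if_neg (by intro hc; exact h2 hc.1), ih (i+1) _ (by omega)]
        rw [hd, hlast, gMerge, gMerge]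
        simp
    · simp only [h, dif_neg, not_false_iff]
      rw [List.drop_eq_nil_of_le (by omega), gMerge]
      simp

theorem mergeB_loop_eq (bp : Int × Int) (nt : Int) :
    ∀ (l : List Int) (out : List Int) (pending : Option Int),
      mergeB_finish (l.foldl (mergeB_step bp nt) (out, pending)) =
        out ++ (match pending with
                | none => gMerge bp nt l
                | some p => gMerge bp nt (p :: l)) := by
  intro l
  induction l with
  | nil =>
    intro out pending
    cases pending with
    | none => simp [mergeB_finish, gMerge]
    | some p => simp [mergeB_finish, gMerge]
  | cons t r ih =>
    intro out pending
    cases pending with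
    | none =>
      simp only [List.foldl_cons, mergeB_step]
      rw [ih out (some t)]
    | some p =>
      simp only [List.foldl_cons, mergeB_step]
      by_cases hp : (p, t) = bp
      · rw [if_pos hp, ih (out ++ [nt]) none, gMerge, if_pos hp]
        simp
      · rw [if_neg hp, ih (out ++ [p]) (some t), gMerge, if_neg hp]
        simp

-- ===== VERDICT (by name: the statement is the Claim_ definition above) =====
theorem merge_the_pair_spec : Claim_equal_merge_the_pair := by
  intro tokens bp _
  unfold Spec_merge_the_pair merge_the_pair merge_the_pair_alt
  rw [mergeA_loop_eq_aux tokens bp (bp.1 + bp.2) tokens.length 0 [] (by omega), mergeB_loop_eq bp (bp.1 + bp.2) tokens [] none]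
  simp
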